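-- pv_equiv track=rewrite | github.com/nicholaspetco-afk/MAQUA-customer-data | app.py | _looks_like_phone
-- ===== SOURCE A (Python) =====
-- def _looks_like_phone(text: str) -> bool:
--     # 檢查是否包含中文字符，如果包含則不是電話號碼
--     if any('\u4e00' <= ch <= '\u9fff' for ch in text):
--         return False
--
--     digits = [ch for ch in text if ch.isdigit()]
--     if len(digits) < 6:
--         return False
--     non_digits = [ch for ch in text if not (ch.isdigit() or ch in {"+", "-", " ", "#"})]
--     return len(non_digits) <= 3
-- ===== SOURCE B (Python) =====
-- def _looks_like_phone(text: str) -> bool: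
--     # single pass: one loop maintaining digit/bad counters and a Chinese flag
--     digit_count = 0
--     bad_count = 0
--     has_chinese = False
--     for ch in text:
--         if '\u4e00' <= ch <= '\u9fff':
--             has_chinese = True
--         elif ch.isdigit():
--             digit_count += 1
--         elif ch not in {"+", "-", " ", "#"}:
--             bad_count += 1
--     if has_chinese:
--         return False
--     if digit_count < 6:
--         return False
--     return bad_count <= 3
-- ===== Notes on version B (the rewrite author's own statement) =====
-- stated objective: alternative
-- what changed: Replaces the three separate scans (any() Chinese check plus two filtering list comprehensions) with a single pass that maintains digit and bad-character counters and a Chinese flag, building no intermediate lists.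
import Mathlib
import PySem

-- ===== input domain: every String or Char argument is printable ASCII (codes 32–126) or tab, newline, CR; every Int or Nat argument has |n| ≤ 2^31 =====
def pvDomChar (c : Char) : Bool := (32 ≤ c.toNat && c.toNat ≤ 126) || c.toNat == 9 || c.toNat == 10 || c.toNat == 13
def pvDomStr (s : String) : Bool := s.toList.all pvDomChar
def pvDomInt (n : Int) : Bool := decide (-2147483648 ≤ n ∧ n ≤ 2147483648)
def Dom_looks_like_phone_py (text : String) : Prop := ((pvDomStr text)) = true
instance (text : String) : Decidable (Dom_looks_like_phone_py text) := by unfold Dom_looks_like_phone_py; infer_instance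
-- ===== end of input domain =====

-- B replaces A's three scans (any() Chinese check + two filtering comprehensions) with one
-- counting pass over the string; same return value, no speed claim.


-- ===== PORT A =====
def pvChinese (ch : Char) : Bool := 0x4e00 ≤ ch.toNat && ch.toNat ≤ 0x9fff

def pvAllowed (ch : Char) : Bool := ch == '+' || ch == '-' || ch == ' ' || ch == '#'

def looks_like_phone_py (text : String) : Bool :=
  let cs := text.toList
  if cs.any pvChinese then false
  else
    let digits := cs.filter (fun ch => PySem.Chars.isdigit ch)
    if digits.length < 6 then false
    else
      let non_digits := cs.filter (fun ch => !(PySem.Chars.isdigit ch || pvAllowed ch))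
      decide (non_digits.length ≤ 3)

-- ===== PORT B =====
def pvStep (s : Nat × Nat × Bool) (ch : Char) : Nat × Nat × Bool :=
  if pvChinese ch then (s.1, s.2.1, true)
  else if PySem.Chars.isdigit ch then (s.1 + 1, s.2.1, s.2.2)
  else if pvAllowed ch then s
  else (s.1, s.2.1 + 1, s.2.2)

def looks_like_phone_py_alt (text : String) : Bool :=
  let st := text.toList.foldl pvStep (0, 0, false)
  if st.2.2 then false
  else if st.1 < 6 then false
  else decide (st.2.1 ≤ 3)

-- ===== PRECONDITION & SPEC =====
def Spec_looks_like_phone_py (text : String) (out : Bool) : Prop := out = looks_like_phone_py_alt text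
instance (text : String) (out : Bool) : Decidable (Spec_looks_like_phone_py text out) := by unfold Spec_looks_like_phone_py; infer_instance

-- ===== CLAIM (what is proved, stated in full; the proofs are below) =====
def Claim_equal_looks_like_phone_py : Prop := ∀ (text : String), Dom_looks_like_phone_py text → Spec_looks_like_phone_py text (looks_like_phone_py text)

-- ===== LEMMAS AND PROOFS =====

-- the Chinese flag of the fold is the 'any' of the chars, ored with the start flag
theorem pvFold_flag (cs : List Char) (d b : Nat) (c : Bool) :
    (cs.foldl pvStep (d, b, c)).2.2 = (c || cs.any pvChinese) := by
  induction cs generalizing d b c with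
  | nil => simp
  | cons ch tl ih =>
    simp only [List.foldl_cons, List.any_cons, pvStep]
    split_ifs with h1 h2 h3 <;> simp [ih, h1]

-- with no Chinese character, the fold counts digits and bad characters
theorem pvFold_counts (cs : List Char) (hnc : cs.any pvChinese = false) (d b : Nat) (c : Bool) :
    cs.foldl pvStep (d, b, c) =
      (d + (cs.filter (fun ch => PySem.Chars.isdigit ch)).length,
       b + (cs.filter (fun ch => !(PySem.Chars.isdigit ch || pvAllowed ch))).length, c) := by
  induction cs generalizing d b c with
  | nil => simp
  | cons ch tl ih =>
    simp only [List.any_cons, Bool.or_eq_false_iff] at hnc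
    obtain ⟨h1, htl⟩ := hnc
    by_cases hd : PySem.Chars.isdigit ch = true
    · simp [pvStep, h1, hd, ih htl, List.filter_cons, Nat.add_assoc, Nat.add_comm 1]
    · by_cases ha : pvAllowed ch = true
      · simp [pvStep, h1, hd, ha, ih htl, List.filter_cons]
      · simp [pvStep, h1, hd, ha, ih htl, List.filter_cons, Nat.add_assoc, Nat.add_comm 1]

-- ===== VERDICT (by name: the statement is the Claim_ definition above) =====
theorem looks_like_phone_py_spec : Claim_equal_looks_like_phone_py := by
  intro text _
  unfold Spec_looks_like_phone_py looks_like_phone_py looks_like_phone_py_alt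
  by_cases hc : text.toList.any pvChinese = true
  · simp [hc, pvFold_flag]
  · simp only [Bool.not_eq_true] at hc
    simp [hc, pvFold_counts _ hc]
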